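-- pv_equiv track=rewrite | github.com/pannaf/crossfit-leaderboard-remix | scripts/convert_data.py | build_event_point_map
-- ===== SOURCE A (Python) =====
-- def get_place_string(place: int) -> str:
--     if place == 1:
--         return "1st"
--     if place == 2:
--         return "2nd"
--     if place == 3:
--         return "3rd"
--     if place % 10 == 1 and place != 11:
--         return f"{place}st"
--     if place % 10 == 2 and place != 12:
--         return f"{place}nd"
--     if place % 10 == 3 and place != 13:
--         return f"{place}rd"
--     return f"{place}th"
--
-- def build_event_point_map(athletes, events):
--     """Derive exact observed points for each event/place from the CSV results."""
--     event_point_map = {event: {} for event in events}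
--     event_field_size = {event: 0 for event in events}
--
--     for athlete in athletes:
--         results = athlete.get("events", {}) or {}
--         for event, res in results.items():
--             if not res:
--                 continue
--             place = res.get("place")
--             pts = res.get("points", 0) or 0
--             if isinstance(place, int):
--                 place_str = get_place_string(place)
--                 # Prefer the highest points seen for a given place (safety against inconsistencies)
--                 current = event_point_map[event].get(place_str)
--                 if current is None or pts > current:
--                     event_point_map[event][place_str] = pts
--                 # Track field size by max place observed
--                 if place > event_field_size[event]:
--                     event_field_size[event] = place
--
--     return event_point_map, event_field_size
-- ===== SOURCE B (Python) =====
-- def get_place_string(place: int) -> str: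
--     if place == 1:
--         return "1st"
--     if place == 2:
--         return "2nd"
--     if place == 3:
--         return "3rd"
--     if place % 10 == 1 and place != 11:
--         return f"{place}st"
--     if place % 10 == 2 and place != 12:
--         return f"{place}nd"
--     if place % 10 == 3 and place != 13:
--         return f"{place}rd"
--     return f"{place}th"
--
-- def build_event_point_map(athletes, events):
--     """Flatten every valid result to an (event, place, points) triple, then build
--     each event's entry independently by filtering the triples and reducing with max()."""
--     triples = []
--     for athlete in athletes:
--         results = athlete.get("events", {}) or {}
--         for event, res in results.items():
--             if not res:
--                 continue
--             place = res.get("place")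
--             pts = res.get("points", 0) or 0
--             if isinstance(place, int):
--                 triples.append((event, place, pts))
--
--     event_point_map = {}
--     event_field_size = {}
--     for ev in events:
--         rows = [(get_place_string(pl), pts) for e, pl, pts in triples if e == ev]
--         order = []
--         for ps, _ in rows:
--             if ps not in order:
--                 order.append(ps)
--         event_point_map[ev] = {ps: max(p for s, p in rows if s == ps) for ps in order}
--         event_field_size[ev] = max([0] + [pl for e, pl, _ in triples if e == ev])
--     return event_point_map, event_field_size
-- ===== Notes on version B (the rewrite author's own statement) =====
-- stated objective: alternative
-- what changed: A makes one pass over the results threading a dict-of-dicts of running per-place maxima and a running field-size dict; B first flattens the valid results into a plain list of (event, place, points) triples and then builds each event's entry independently by filtering that list and reducing with max(), with no incremental dict state.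
import Mathlib
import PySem

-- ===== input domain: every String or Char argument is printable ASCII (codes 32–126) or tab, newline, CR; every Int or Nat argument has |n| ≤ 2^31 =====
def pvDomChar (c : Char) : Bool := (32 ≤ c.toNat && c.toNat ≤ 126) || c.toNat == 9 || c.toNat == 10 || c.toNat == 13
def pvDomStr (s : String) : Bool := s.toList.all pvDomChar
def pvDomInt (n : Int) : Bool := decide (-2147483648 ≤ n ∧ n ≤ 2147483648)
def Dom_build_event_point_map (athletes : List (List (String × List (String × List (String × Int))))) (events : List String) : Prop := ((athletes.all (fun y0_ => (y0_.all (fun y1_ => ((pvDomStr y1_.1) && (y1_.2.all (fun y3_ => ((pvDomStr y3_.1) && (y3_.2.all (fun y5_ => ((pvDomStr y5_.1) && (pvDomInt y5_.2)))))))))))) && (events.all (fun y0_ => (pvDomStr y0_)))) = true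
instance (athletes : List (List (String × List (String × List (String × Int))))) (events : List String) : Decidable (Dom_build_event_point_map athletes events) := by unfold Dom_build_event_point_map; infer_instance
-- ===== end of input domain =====

-- B is an ALTERNATIVE decomposition (flatten-to-triples, then build each event's entry
-- independently by filter + max reduction) instead of A's single pass threading running
-- per-place maxima through a dict-of-dicts; no speed claim.

-- ===== PORT A =====
-- shared by both Pythons (Source B carries a verbatim copy of get_place_string)
def get_place_string (place : Int) : String :=
  if place == 1 then "1st"
  else if place == 2 then "2nd"
  else if place == 3 then "3rd"
  else if PySem.Int.mod place 10 == 1 && place != 11 then PySem.Int.toStr place ++ "st"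
  else if PySem.Int.mod place 10 == 2 && place != 12 then PySem.Int.toStr place ++ "nd"
  else if PySem.Int.mod place 10 == 3 && place != 13 then PySem.Int.toStr place ++ "rd"
  else PySem.Int.toStr place ++ "th"

-- body of A's inner loop over results.items()
def pvStepResA (st : PySem.Dict String (PySem.Dict String Int) × PySem.Dict String Int)
    (er : String × List (String × Int)) :
    PySem.Dict String (PySem.Dict String Int) × PySem.Dict String Int :=
  let res := PySem.Dict.ofList er.2
  if res.items.isEmpty then st                        -- `if not res: continue`
  else
    let pts := res.getD "points" 0                    -- `res.get("points", 0) or 0`: `or 0` is the identity on ints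
    match res.get? "place" with
    | none => st                                      -- missing key ⇒ place is None ⇒ isinstance(place, int) is False
    | some place =>                                   -- present values are ints by the type convention
      let place_str := get_place_string place
      -- `event_point_map[event]` raises KeyError when the event is unseen: excluded by Pre_
      let current := (st.1.getD er.1 PySem.Dict.empty).get? place_str
      let epm :=
        match current with
        | none => st.1.modify er.1 PySem.Dict.empty (fun d => d.insert place_str pts)
        | some c =>
          if pts > c then st.1.modify er.1 PySem.Dict.empty (fun d => d.insert place_str pts)
          else st.1
      let efs := if place > st.2.getD er.1 0 then st.2.insert er.1 place else st.2
      (epm, efs)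

-- body of A's outer loop over athletes
def pvStepAthleteA (st : PySem.Dict String (PySem.Dict String Int) × PySem.Dict String Int)
    (athlete : List (String × List (String × List (String × Int)))) :
    PySem.Dict String (PySem.Dict String Int) × PySem.Dict String Int :=
  let results := PySem.Dict.ofList ((PySem.Dict.ofList athlete).getD "events" [])
  results.items.foldl pvStepResA st

def build_event_point_map (athletes : List (List (String × List (String × List (String × Int))))) (events : List String) : (List (String × List (String × Int))) × (List (String × Int)) :=
  let epm0 : PySem.Dict String (PySem.Dict String Int) :=
    events.foldl (fun d e => d.insert e PySem.Dict.empty) PySem.Dict.empty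
  let efs0 : PySem.Dict String Int :=
    events.foldl (fun d e => d.insert e 0) PySem.Dict.empty
  let st := athletes.foldl pvStepAthleteA (epm0, efs0)
  (st.1.items.map (fun p => (p.1, p.2.items)), st.2.items)

-- ===== PORT B =====
-- phase 1, inner loop body: append the (event, place, points) triple of a valid result
def pvCollectRes (acc : List (String × Int × Int)) (er : String × List (String × Int)) :
    List (String × Int × Int) :=
  let res := PySem.Dict.ofList er.2
  if res.items.isEmpty then acc                       -- `if not res: continue`
  else
    let pts := res.getD "points" 0                    -- `res.get("points", 0) or 0`: `or 0` is the identity on ints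
    match res.get? "place" with
    | none => acc                                     -- missing key ⇒ place is None ⇒ isinstance(place, int) is False
    | some place => acc ++ [(er.1, place, pts)]

-- phase 1, outer loop body
def pvCollectAthlete (acc : List (String × Int × Int))
    (athlete : List (String × List (String × List (String × Int)))) :
    List (String × Int × Int) :=
  ((PySem.Dict.ofList ((PySem.Dict.ofList athlete).getD "events" [])).items).foldl pvCollectRes acc

def build_event_point_map_alt (athletes : List (List (String × List (String × List (String × Int))))) (events : List String) : (List (String × List (String × Int))) × (List (String × Int)) :=
  let triples := athletes.foldl pvCollectAthlete []
  -- `for ev in events:` filling two dicts; `event_point_map[ev] = …` is an insert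
  let epm : PySem.Dict String (List (String × Int)) :=
    events.foldl (fun d ev =>
      let rows := (triples.filter (fun t => t.1 == ev)).map (fun t => (get_place_string t.2.1, t.2.2))
      -- the `order` accumulation loop (`if ps not in order: order.append(ps)`)
      let order := rows.foldl (fun acc r => if acc.contains r.1 then acc else acc ++ [r.1]) []
      -- `{ps: max(p for s, p in rows if s == ps) for ps in order}`: keys of `order` are
      -- distinct, so the comprehension's items are exactly this map; the generator is
      -- nonempty for every ps in order, so maxD's default 0 is unreachable
      d.insert ev (order.map (fun ps =>
        (ps, PySem.List.maxD ((rows.filter (fun r => r.1 == ps)).map (fun r => r.2)) (fun x => x) 0))))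
      PySem.Dict.empty
  let efs : PySem.Dict String Int :=
    events.foldl (fun d ev =>
      -- `max([0] + [pl for e, pl, _ in triples if e == ev])`: nonempty, default unreachable
      d.insert ev (PySem.List.maxD (0 :: (triples.filter (fun t => t.1 == ev)).map (fun t => t.2.1)) (fun x => x) 0))
      PySem.Dict.empty
  (epm.items, efs.items)

-- ===== PRECONDITION & SPEC =====
-- Pre_ excludes exactly the inputs where the Python raises KeyError (both A and B do not index,
-- but A does): some athlete has, in its (deduplicated) "events" dict, a nonempty result dict
-- carrying a "place" key for an event name not listed in `events`.
def Pre_build_event_point_map (athletes : List (List (String × List (String × List (String × Int))))) (events : List String) : Prop :=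
  ∀ athlete ∈ athletes,
    ∀ er ∈ (PySem.Dict.ofList ((PySem.Dict.ofList athlete).getD "events" [])).items,
      (PySem.Dict.ofList er.2).items ≠ [] →
      ((PySem.Dict.ofList er.2).get? "place").isSome →
      er.1 ∈ events
instance (athletes : List (List (String × List (String × List (String × Int))))) (events : List String) : Decidable (Pre_build_event_point_map athletes events) := by unfold Pre_build_event_point_map; infer_instance

def pvWitness_build_event_point_map : (List (List (String × List (String × List (String × Int))))) × List String :=
  ([[("events", [("Run", [("place", 2), ("points", 80)]), ("Lift", [("place", 1), ("points", 100)])])],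
    [("events", [("Run", [("place", 1), ("points", 90)])])]],
   ["Run", "Lift", "Swim"])

def Spec_build_event_point_map (athletes : List (List (String × List (String × List (String × Int))))) (events : List String) (out : (List (String × List (String × Int))) × (List (String × Int))) : Prop := out = build_event_point_map_alt athletes events
instance (athletes : List (List (String × List (String × List (String × Int))))) (events : List String) (out : (List (String × List (String × Int))) × (List (String × Int))) : Decidable (Spec_build_event_point_map athletes events out) := by unfold Spec_build_event_point_map; infer_instance

-- ===== CLAIM (what is proved, stated in full; the proofs are below) =====
def Claim_equal_build_event_point_map : Prop := ∀ (athletes : List (List (String × List (String × List (String × Int))))) (events : List String), Dom_build_event_point_map athletes events → Pre_build_event_point_map athletes events → Spec_build_event_point_map athletes events (build_event_point_map athletes events)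

-- ===== LEMMAS AND PROOFS =====

-- the triple a single result contributes (the common guard logic, as a 0/1-element list)
def pvEmit (er : String × List (String × Int)) : List (String × Int × Int) :=
  let res := PySem.Dict.ofList er.2
  if res.items.isEmpty then []
  else
    match res.get? "place" with
    | none => []
    | some place => [(er.1, place, res.getD "points" 0)]

-- A's post-guard body, as a step over one triple
def pvStepT (st : PySem.Dict String (PySem.Dict String Int) × PySem.Dict String Int)
    (t : String × Int × Int) :
    PySem.Dict String (PySem.Dict String Int) × PySem.Dict String Int :=
  let place_str := get_place_string t.2.1
  let current := (st.1.getD t.1 PySem.Dict.empty).get? place_str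
  let epm :=
    match current with
    | none => st.1.modify t.1 PySem.Dict.empty (fun d => d.insert place_str t.2.2)
    | some c =>
      if t.2.2 > c then st.1.modify t.1 PySem.Dict.empty (fun d => d.insert place_str t.2.2)
      else st.1
  let efs := if t.2.1 > st.2.getD t.1 0 then st.2.insert t.1 t.2.1 else st.2
  (epm, efs)

-- per-key steps of the decomposed computation
def pvStepPS (d : PySem.Dict String Int) (r : String × Int) : PySem.Dict String Int :=
  match d.get? r.1 with
  | none => d.insert r.1 r.2
  | some c => if r.2 > c then d.insert r.1 r.2 else d

def pvStepPM (d : PySem.Dict String Int) (q : Int × Int) : PySem.Dict String Int :=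
  pvStepPS d (get_place_string q.1, q.2)

def pvStepFS (m : Int) (q : Int × Int) : Int := if q.1 > m then q.1 else m

-- first occurrences among the keys of `rows` that are not in `seen`
def pvNew : List String → List (String × Int) → List String
  | _, [] => []
  | seen, r :: rest =>
    if seen.contains r.1 then pvNew seen rest else r.1 :: pvNew (seen ++ [r.1]) rest

-- flattening: B's collectors emit exactly pvEmit
lemma pvCollectRes_eq (acc : List (String × Int × Int)) (er : String × List (String × Int)) :
    pvCollectRes acc er = acc ++ pvEmit er := by
  unfold pvCollectRes pvEmit
  cases h : (PySem.Dict.ofList er.2).items.isEmpty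
  · cases hp : (PySem.Dict.ofList er.2).get? "place" <;> simp [h, hp]
  · simp [h]

lemma pvFoldCollectRes (l : List (String × List (String × Int))) (acc : List (String × Int × Int)) :
    l.foldl pvCollectRes acc = acc ++ l.flatMap pvEmit := by
  rw [← PySem.List.foldl_append_eq_flatMap pvEmit l acc]
  exact PySem.List.foldl_congr_mem l _ _ acc (fun acc' x _ => pvCollectRes_eq acc' x)

lemma pvTriples_eq (athletes : List (List (String × List (String × List (String × Int))))) :
    athletes.foldl pvCollectAthlete []
      = athletes.flatMap (fun a =>
          ((PySem.Dict.ofList ((PySem.Dict.ofList a).getD "events" [])).items).flatMap pvEmit) := by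
  have h := PySem.List.foldl_append_eq_flatMap
    (fun a => ((PySem.Dict.ofList ((PySem.Dict.ofList a).getD "events" [])).items).flatMap pvEmit)
    athletes []
  rw [List.nil_append] at h
  rw [← h]
  exact PySem.List.foldl_congr_mem athletes _ _ [] (fun acc a _ => pvFoldCollectRes _ acc)

-- A's loops are the fold of pvStepT over the same triples
lemma pvStepResA_eq (st : PySem.Dict String (PySem.Dict String Int) × PySem.Dict String Int)
    (er : String × List (String × Int)) :
    pvStepResA st er = (pvEmit er).foldl pvStepT st := by
  unfold pvStepResA pvEmit
  cases h : (PySem.Dict.ofList er.2).items.isEmpty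
  · cases hp : (PySem.Dict.ofList er.2).get? "place" with
    | none => simp [h, hp]
    | some place =>
      simp only [h, Bool.false_eq_true, if_false, hp, List.foldl_cons, List.foldl_nil]
      rfl
  · simp [h]

lemma pvFoldA_eq (athletes : List (List (String × List (String × List (String × Int)))))
    (st : PySem.Dict String (PySem.Dict String Int) × PySem.Dict String Int) :
    athletes.foldl pvStepAthleteA st
      = (athletes.flatMap (fun a =>
          ((PySem.Dict.ofList ((PySem.Dict.ofList a).getD "events" [])).items).flatMap pvEmit)).foldl
          pvStepT st := by
  rw [List.foldl_flatMap]
  refine PySem.List.foldl_congr_mem athletes _ _ st ?_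
  intro st' a _
  show pvStepAthleteA st' a = _
  unfold pvStepAthleteA
  rw [List.foldl_flatMap]
  exact PySem.List.foldl_congr_mem _ _ _ st' (fun st'' er _ => pvStepResA_eq st'' er)

-- in-place rewrite of an existing entry with its own value is the identity
lemma pvMapIte_self {β : Type} (k : String) (v : β) (l : List (String × β))
    (h : (l.find? (fun p => p.1 == k)).map (fun x => x.2) = some v)
    (hn : (l.map (fun x => x.1)).Nodup) :
    l.map (fun p => if p.1 == k then (k, v) else p) = l := by
  induction l with
  | nil => simp at h
  | cons p t ih =>
    by_cases hp : (p.1 == k) = true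
    · have hk : p.1 = k := eq_of_beq hp
      rw [List.find?_cons, hp] at h
      simp only [Option.map_some, Option.some.injEq] at h
      have hpn : p.1 ∉ t.map (fun x => x.1) := by
        have h' := hn
        rw [List.map_cons, List.nodup_cons] at h'
        exact h'.1
      have htail : ∀ q ∈ t, (q.1 == k) = false := by
        intro q hq
        have hne : q.1 ≠ k := by
          intro he
          apply hpn
          rw [hk, ← he]
          exact List.mem_map_of_mem hq
        simpa using hne
      simp only [List.map_cons, if_pos hp]
      congr 1
      · rw [← hk, ← h]
      · rw [List.map_congr_left (fun q hq => if_neg (by simp [htail q hq])), List.map_id']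
    · have hp' : (p.1 == k) = false := by simpa using hp
      simp only [List.find?_cons, hp'] at h
      simp only [List.map_cons, if_neg hp]
      have h' := hn
      rw [List.map_cons, List.nodup_cons] at h'
      rw [ih h h'.2]

lemma pvInsert_self {β : Type} (d : PySem.Dict String β) (k : String) (v : β)
    (h : d.get? k = some v) (hn : d.keys.Nodup) : d.insert k v = d := by
  have hc : d.contains k = true := by rw [PySem.Dict.contains_eq_isSome_get?, h]; rfl
  apply PySem.Dict.ext
  rw [PySem.Dict.items_insert_of_contains d v hc]
  exact pvMapIte_self k v d.items (by simpa [PySem.Dict.get?] using h)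
    (by simpa [PySem.Dict.keys] using hn)

-- splitting A's paired fold into two independent per-dict modify folds
lemma pvSplit (T : List (String × Int × Int)) :
    ∀ (d1 : PySem.Dict String (PySem.Dict String Int)) (d2 : PySem.Dict String Int),
    d1.keys.Nodup → d2.keys.Nodup →
    (∀ x ∈ T, d1.contains x.1 = true) → (∀ x ∈ T, d2.contains x.1 = true) →
    T.foldl pvStepT (d1, d2)
      = (T.foldl (fun d x => d.modify x.1 PySem.Dict.empty (fun v => pvStepPM v x.2)) d1,
         T.foldl (fun d x => d.modify x.1 0 (fun v => pvStepFS v x.2)) d2) := by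
  induction T with
  | nil => intro d1 d2 _ _ _ _; rfl
  | cons x t ih =>
    intro d1 d2 hn1 hn2 hc1 hc2
    have hc1x := hc1 x (List.mem_cons_self)
    have hc2x := hc2 x (List.mem_cons_self)
    obtain ⟨v1, hv1⟩ : ∃ v, d1.get? x.1 = some v :=
      Option.isSome_iff_exists.mp ((PySem.Dict.contains_eq_isSome_get? d1 x.1) ▸ hc1x)
    obtain ⟨v2, hv2⟩ : ∃ v, d2.get? x.1 = some v :=
      Option.isSome_iff_exists.mp ((PySem.Dict.contains_eq_isSome_get? d2 x.1) ▸ hc2x)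
    have hstep : pvStepT (d1, d2) x
        = (d1.modify x.1 PySem.Dict.empty (fun v => pvStepPM v x.2),
           d2.modify x.1 0 (fun v => pvStepFS v x.2)) := by
      unfold pvStepT pvStepPM pvStepPS pvStepFS PySem.Dict.modify
      dsimp only
      congr 1
      · cases hcur : (d1.getD x.1 PySem.Dict.empty).get? (get_place_string x.2.1) with
        | none => simp
        | some c =>
          by_cases hgt : x.2.2 > c
          · simp [hgt]
          · simp only [if_neg hgt]
            have hgd1 : d1.getD x.1 PySem.Dict.empty = v1 := by
              rw [PySem.Dict.getD_eq_get?_getD, hv1]; rfl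
            rw [hgd1]
            exact (pvInsert_self d1 x.1 v1 hv1 hn1).symm
      · by_cases hgt : x.2.1 > d2.getD x.1 0
        · simp [hgt]
        · simp only [if_neg hgt]
          have hgd2 : d2.getD x.1 0 = v2 := by
            rw [PySem.Dict.getD_eq_get?_getD, hv2]; rfl
          rw [hgd2]
          exact (pvInsert_self d2 x.1 v2 hv2 hn2).symm
    rw [List.foldl_cons, List.foldl_cons, List.foldl_cons, hstep]
    refine ih _ _ ?_ ?_ ?_ ?_
    · exact PySem.Dict.nodup_keys_insert _ _ _ hn1
    · exact PySem.Dict.nodup_keys_insert _ _ _ hn2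
    · intro y hy
      rw [PySem.Dict.contains_modify]
      simp [hc1 y (List.mem_cons_of_mem _ hy)]
    · intro y hy
      rw [PySem.Dict.contains_modify]
      simp [hc2 y (List.mem_cons_of_mem _ hy)]

-- a per-key modify fold acts independently on every entry
lemma pvDecomp {ν : Type} (c0 : ν) (σ : ν → Int × Int → ν) (T : List (String × Int × Int)) :
    ∀ (d : PySem.Dict String ν), d.keys.Nodup → (∀ x ∈ T, d.contains x.1 = true) →
    (T.foldl (fun d x => d.modify x.1 c0 (fun v => σ v x.2)) d).items
      = d.items.map (fun p =>
          (p.1, ((T.filter (fun x => x.1 == p.1)).map (fun x => x.2)).foldl σ p.2)) := by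
  induction T with
  | nil =>
    intro d _ _
    simp
  | cons x t ih =>
    intro d hn hc
    have hcx := hc x (List.mem_cons_self)
    obtain ⟨v, hv⟩ : ∃ v, d.get? x.1 = some v :=
      Option.isSome_iff_exists.mp ((PySem.Dict.contains_eq_isSome_get? d x.1) ▸ hcx)
    have hgD : d.getD x.1 c0 = v := by rw [PySem.Dict.getD_eq_get?_getD, hv]; rfl
    rw [List.foldl_cons]
    have hmod : d.modify x.1 c0 (fun v => σ v x.2) = d.insert x.1 (σ v x.2) := by
      unfold PySem.Dict.modify; rw [hgD]
    rw [hmod]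
    rw [ih _ (PySem.Dict.nodup_keys_insert _ _ _ hn)
      (fun y hy => by
        rw [PySem.Dict.contains_insert]
        simp [hc y (List.mem_cons_of_mem _ hy)])]
    rw [PySem.Dict.items_insert_of_contains d _ hcx, List.map_map]
    refine List.map_congr_left ?_
    intro p hp
    by_cases hpk : (p.1 == x.1) = true
    · have hk : p.1 = x.1 := eq_of_beq hpk
      have hp' : (x.1, p.2) ∈ d.items := by rw [← hk]; simpa using hp
      have hpv : p.2 = v := by
        have h2 := PySem.Dict.get?_of_mem_items d hp' hn
        rw [hv] at h2
        exact (Option.some.inj h2).symm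
      simp only [Function.comp_apply, List.filter_cons, hk,
        beq_self_eq_true, if_pos, List.map_cons, List.foldl_cons, hpv]
    · have hpk' : (p.1 == x.1) = false := by simpa using hpk
      simp only [Function.comp_apply, hpk', List.filter_cons]
      have : (x.1 == p.1) = false := by
        simp only [beq_eq_false_iff_ne] at hpk' ⊢
        exact fun h => hpk' h.symm
      simp [this]

-- a fold of inserts with a value depending only on the key, from the empty dict
lemma pvItemsFoldlInsertFun {ν : Type} (v : String → ν) (l : List String) :
    (l.foldl (fun d e => d.insert e (v e)) PySem.Dict.empty).items
      = (PySem.Set.ofList l).map (fun e => (e, v e)) := by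
  induction l using List.reverseRecOn with
  | nil => rfl
  | append_singleton l e ih =>
    rw [List.foldl_append, List.foldl_cons, List.foldl_nil]
    have hkeys : (l.foldl (fun d e => d.insert e (v e)) PySem.Dict.empty).keys
        = PySem.Set.ofList l := by
      rw [PySem.Dict.keys_foldl_insert l (fun _ e => v e) PySem.Dict.empty]
      rw [PySem.Dict.keys_empty]
      rfl
    have hnodup : (l.foldl (fun d e => d.insert e (v e)) PySem.Dict.empty).keys.Nodup := by
      rw [hkeys]; exact PySem.Set.nodup_ofList l
    have hofl : PySem.Set.ofList (l ++ [e]) = PySem.Set.add (PySem.Set.ofList l) e := by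
      unfold PySem.Set.ofList
      rw [List.foldl_append, List.foldl_cons, List.foldl_nil]
    by_cases hm : e ∈ PySem.Set.ofList l
    · have hcont : (l.foldl (fun d e => d.insert e (v e)) PySem.Dict.empty).contains e = true := by
        rw [PySem.Dict.contains_iff_mem_keys, hkeys]; exact hm
      have hget : (l.foldl (fun d e => d.insert e (v e)) PySem.Dict.empty).get? e = some (v e) := by
        apply PySem.Dict.get?_of_mem_items _ _ hnodup
        rw [ih]
        exact List.mem_map_of_mem hm
      rw [pvInsert_self _ e (v e) hget hnodup, ih, hofl]
      have : PySem.Set.add (PySem.Set.ofList l) e = PySem.Set.ofList l := by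
        unfold PySem.Set.add
        rw [if_pos (by simpa using hm)]
      rw [this]
    · have hcont : (l.foldl (fun d e => d.insert e (v e)) PySem.Dict.empty).contains e = false := by
        rw [← Bool.not_eq_true, PySem.Dict.contains_iff_mem_keys, hkeys]; exact hm
      rw [PySem.Dict.items_insert_of_not_contains _ _ hcont, ih, hofl]
      have hcf : (PySem.Set.ofList l : List String).contains e = false := by
        rw [← Bool.not_eq_true]
        simpa using hm
      have : PySem.Set.add (PySem.Set.ofList l) e = PySem.Set.ofList l ++ [e] := by
        unfold PySem.Set.add
        rw [hcf]
        simp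
      rw [this, List.map_append]
      rfl

lemma pvNew_cons (seen : List String) (r : String × Int) (rest : List (String × Int)) :
    pvNew seen (r :: rest)
      = if seen.contains r.1 then pvNew seen rest else r.1 :: pvNew (seen ++ [r.1]) rest := rfl

-- B's `order` loop computes pvNew
lemma pvOrder_eq (rows : List (String × Int)) :
    ∀ (seen : List String),
    rows.foldl (fun acc r => if acc.contains r.1 then acc else acc ++ [r.1]) seen
      = seen ++ pvNew seen rows := by
  induction rows with
  | nil => intro seen; simp [pvNew]
  | cons r rest ih =>
    intro seen
    rw [List.foldl_cons]
    rw [pvNew_cons]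
    by_cases h : seen.contains r.1 = true
    · rw [if_pos h, if_pos h, ih]
    · rw [if_neg h, if_neg h, ih, List.append_assoc]
      rfl

lemma pvNew_not_mem_seen (rows : List (String × Int)) :
    ∀ (seen : List String) (x : String), x ∈ pvNew seen rows → seen.contains x = false := by
  induction rows with
  | nil => intro seen x h; simp [pvNew] at h
  | cons r rest ih =>
    intro seen x h
    rw [pvNew_cons] at h
    by_cases hc : seen.contains r.1 = true
    · rw [if_pos hc] at h
      exact ih seen x h
    · rw [if_neg hc] at h
      rcases List.mem_cons.mp h with rfl | h
      · rw [← Bool.not_eq_true]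
        exact hc
      · have h2 := ih (seen ++ [r.1]) x h
        rw [← Bool.not_eq_true] at h2 ⊢
        intro hx
        apply h2
        simp only [List.contains_append]
        simp only [Bool.or_eq_true]
        exact Or.inl hx

-- characterization of the per-event inner fold: first-seen order, max per place string
lemma pvInner (rows : List (String × Int)) :
    ∀ (d : PySem.Dict String Int), d.keys.Nodup →
    (rows.foldl pvStepPS d).items
      = d.items.map (fun p =>
          (p.1, ((rows.filter (fun r => r.1 == p.1)).map (fun r => r.2)).foldl max p.2))
        ++ (pvNew d.keys rows).map (fun ps =>
          (ps, PySem.List.maxD ((rows.filter (fun r => r.1 == ps)).map (fun r => r.2)) (fun x => x) 0)) := by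
  induction rows with
  | nil =>
    intro d _
    simp [pvNew]
  | cons r rest ih =>
    intro d hn
    rw [List.foldl_cons]
    cases hget : d.get? r.1 with
    | none =>
      have hstep : pvStepPS d r = d.insert r.1 r.2 := by unfold pvStepPS; rw [hget]
      rw [hstep]
      have hcont : d.contains r.1 = false := (PySem.Dict.get?_eq_none_iff_contains d r.1).mp hget
      have hnmem : r.1 ∉ d.keys := (PySem.Dict.get?_eq_none_iff_not_mem_keys d r.1).mp hget
      have hkeys' : (d.insert r.1 r.2).keys = d.keys ++ [r.1] := by
        apply PySem.Dict.keys_insert_of_not_contains d r.2 hcont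
      have hn' : (d.insert r.1 r.2).keys.Nodup := PySem.Dict.nodup_keys_insert _ _ _ hn
      rw [ih _ hn', PySem.Dict.items_insert_of_not_contains d _ hcont, List.map_append, hkeys']
      have hnew : pvNew d.keys (r :: rest) = r.1 :: pvNew (d.keys ++ [r.1]) rest := by
        rw [pvNew_cons, if_neg (by rw [← Bool.not_eq_true] at *; simpa using hnmem)]
      rw [hnew]
      simp only [List.map_cons, List.map_nil, List.append_assoc, List.singleton_append]
      congr 1
      · refine List.map_congr_left ?_
        intro p hp
        have hne : (r.1 == p.1) = false := by
          simp only [beq_eq_false_iff_ne]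
          intro he
          exact hnmem (he ▸ (List.mem_map_of_mem hp : p.1 ∈ d.keys))
        rw [List.filter_cons, if_neg (by simp [hne])]
      · congr 1
        · -- the freshly inserted key: its reduction over (r :: rest)
          rw [List.filter_cons, if_pos (by simp)]
          rw [List.map_cons]
          rw [show ∀ (l : List Int), PySem.List.maxD (r.2 :: l) (fun x => x) 0 = l.foldl max r.2 from
            fun l => by rw [PySem.List.maxD, PySem.List.max?_id_cons]; rfl]
        · refine List.map_congr_left ?_
          intro ps hps
          have hthis := pvNew_not_mem_seen rest (d.keys ++ [r.1]) ps hps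
          have h2 : ps ∉ d.keys ++ [r.1] := by simpa using hthis
          have hne : (r.1 == ps) = false := by
            simp only [beq_eq_false_iff_ne]
            intro he
            exact h2 (List.mem_append_right _ (by simp [he]))
          rw [List.filter_cons, if_neg (by simp [hne])]
    | some c =>
      have hcont : d.contains r.1 = true := by
        rw [PySem.Dict.contains_eq_isSome_get?, hget]; rfl
      have hmem : r.1 ∈ d.keys := (PySem.Dict.contains_iff_mem_keys d r.1).mp hcont
      set v' := if r.2 > c then r.2 else c with hv'
      have hstep : pvStepPS d r = if r.2 > c then d.insert r.1 r.2 else d := by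
        unfold pvStepPS; rw [hget]
      have hd' : (if r.2 > c then d.insert r.1 r.2 else d) = d.insert r.1 v' := by
        by_cases hgt : r.2 > c
        · rw [if_pos hgt, hv', if_pos hgt]
        · rw [if_neg hgt, hv', if_neg hgt]
          exact (pvInsert_self d r.1 c hget hn).symm
      rw [hstep, hd']
      have hkeys' : (d.insert r.1 v').keys = d.keys :=
        PySem.Dict.keys_insert_of_contains d v' hcont
      have hn' : (d.insert r.1 v').keys.Nodup := PySem.Dict.nodup_keys_insert _ _ _ hn
      rw [ih _ hn', PySem.Dict.items_insert_of_contains d _ hcont, List.map_map, hkeys']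
      have hnew : pvNew d.keys (r :: rest) = pvNew d.keys rest := by
        rw [pvNew_cons, if_pos (by simpa using hmem)]
      rw [hnew]
      congr 1
      · refine List.map_congr_left ?_
        intro p hp
        by_cases hpk : (p.1 == r.1) = true
        · have hk : p.1 = r.1 := eq_of_beq hpk
          have hp' : (r.1, p.2) ∈ d.items := by rw [← hk]; simpa using hp
          have hpv : p.2 = c := by
            have h2 := PySem.Dict.get?_of_mem_items d hp' hn
            rw [hget] at h2
            exact (Option.some.inj h2).symm
          simp only [Function.comp_apply, if_pos hpk]
          rw [List.filter_cons, if_pos (by simp [hk]), List.map_cons, List.foldl_cons, hk, hpv]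
          have hvm : v' = max c r.2 := by
            rw [hv']
            by_cases hgt : r.2 > c
            · rw [if_pos hgt, max_eq_right (le_of_lt hgt)]
            · rw [if_neg hgt, max_eq_left (by omega)]
          rw [hvm]
        · have hpk' : (p.1 == r.1) = false := by simpa using hpk
          have : (r.1 == p.1) = false := by
            simp only [beq_eq_false_iff_ne] at hpk' ⊢
            exact fun h => hpk' h.symm
          simp only [Function.comp_apply, hpk', List.filter_cons]
          simp [this]
      · refine List.map_congr_left ?_
        intro ps hps
        have hthis := pvNew_not_mem_seen rest d.keys ps hps
        have h2 : ps ∉ d.keys := by simpa using hthis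
        have hne : (r.1 == ps) = false := by
          simp only [beq_eq_false_iff_ne]
          intro he
          exact h2 (he ▸ hmem)
        rw [List.filter_cons, if_neg (by simp [hne])]

-- the running field-size loop is a running max
lemma pvFS_eq_max (l : List (Int × Int)) (m : Int) :
    l.foldl pvStepFS m = (l.map (fun q => q.1)).foldl max m := by
  rw [List.foldl_map]
  refine PySem.List.foldl_congr_mem l _ _ m ?_
  intro m' q _
  unfold pvStepFS
  by_cases h : q.1 > m'
  · rw [if_pos h, max_eq_right (le_of_lt h)]
  · rw [if_neg h, max_eq_left (by omega)]

lemma pvMaxD_zero_cons (l : List Int) :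
    PySem.List.maxD (0 :: l) (fun x => x) 0 = l.foldl max 0 := by
  rw [PySem.List.maxD, PySem.List.max?_id_cons]; rfl

-- every emitted triple's event name passes the Pre_ guards
lemma pvEmit_event_mem (events : List String)
    (athletes : List (List (String × List (String × List (String × Int)))))
    (hpre : Pre_build_event_point_map athletes events) :
    ∀ x ∈ athletes.flatMap (fun a =>
        ((PySem.Dict.ofList ((PySem.Dict.ofList a).getD "events" [])).items).flatMap pvEmit),
      x.1 ∈ events := by
  intro x hx
  rw [List.mem_flatMap] at hx
  obtain ⟨a, ha, hx⟩ := hx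
  rw [List.mem_flatMap] at hx
  obtain ⟨er, her, hx⟩ := hx
  unfold pvEmit at hx
  by_cases hemp : (PySem.Dict.ofList er.2).items.isEmpty = true
  · simp [hemp] at hx
  · cases hp : (PySem.Dict.ofList er.2).get? "place" with
    | none => simp [hemp, hp] at hx
    | some place =>
      simp [hemp, hp] at hx
      subst hx
      exact hpre a ha er her (by simpa [List.isEmpty_iff] using hemp) (by rw [hp]; rfl)

-- ===== VERDICT (by name: the statement is the Claim_ definition above) =====
theorem build_event_point_map_spec : Claim_equal_build_event_point_map := by
  intro athletes events _ hpre
  unfold Spec_build_event_point_map build_event_point_map build_event_point_map_alt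
  dsimp only
  set T := athletes.flatMap (fun a =>
      ((PySem.Dict.ofList ((PySem.Dict.ofList a).getD "events" [])).items).flatMap pvEmit) with hT
  have hmemT : ∀ x ∈ T, x.1 ∈ events := pvEmit_event_mem events athletes hpre
  -- initial dicts
  have hinit1 := pvItemsFoldlInsertFun (fun _ => (PySem.Dict.empty : PySem.Dict String Int)) events
  have hinit2 := pvItemsFoldlInsertFun (fun _ => (0 : Int)) events
  have hkeys1 : (events.foldl (fun d e => d.insert e (PySem.Dict.empty : PySem.Dict String Int)) PySem.Dict.empty).keys = PySem.Set.ofList events := by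
    rw [PySem.Dict.keys_foldl_insert events (fun _ _ => PySem.Dict.empty) PySem.Dict.empty, PySem.Dict.keys_empty]; rfl
  have hkeys2 : (events.foldl (fun d e => d.insert e (0 : Int)) PySem.Dict.empty).keys = PySem.Set.ofList events := by
    rw [PySem.Dict.keys_foldl_insert events (fun _ _ => (0 : Int)) PySem.Dict.empty, PySem.Dict.keys_empty]; rfl
  have hnod1 : (events.foldl (fun d e => d.insert e (PySem.Dict.empty : PySem.Dict String Int)) PySem.Dict.empty).keys.Nodup := by
    rw [hkeys1]; exact PySem.Set.nodup_ofList events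
  have hnod2 : (events.foldl (fun d e => d.insert e (0 : Int)) PySem.Dict.empty).keys.Nodup := by
    rw [hkeys2]; exact PySem.Set.nodup_ofList events
  have hcont1 : ∀ x ∈ T, (events.foldl (fun d e => d.insert e (PySem.Dict.empty : PySem.Dict String Int)) PySem.Dict.empty).contains x.1 = true := by
    intro x hx
    rw [PySem.Dict.contains_iff_mem_keys, hkeys1, PySem.Set.mem_ofList]
    exact hmemT x hx
  have hcont2 : ∀ x ∈ T, (events.foldl (fun d e => d.insert e (0 : Int)) PySem.Dict.empty).contains x.1 = true := by
    intro x hx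
    rw [PySem.Dict.contains_iff_mem_keys, hkeys2, PySem.Set.mem_ofList]
    exact hmemT x hx
  -- A's fold over triples, split into the two dicts
  rw [pvFoldA_eq, ← hT, pvSplit T _ _ hnod1 hnod2 hcont1 hcont2]
  rw [pvTriples_eq, ← hT]
  -- decompose each per-key fold and the B-side insert folds into item lists
  rw [pvDecomp PySem.Dict.empty (fun v q => pvStepPM v q) T _ hnod1 hcont1,
      pvDecomp 0 (fun v q => pvStepFS v q) T _ hnod2 hcont2,
      hinit1, hinit2,
      pvItemsFoldlInsertFun (fun ev =>
        (((T.filter (fun t => t.1 == ev)).map (fun t => (get_place_string t.2.1, t.2.2))).foldl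
            (fun acc r => if acc.contains r.1 then acc else acc ++ [r.1]) []).map (fun ps =>
          (ps, PySem.List.maxD ((((T.filter (fun t => t.1 == ev)).map (fun t => (get_place_string t.2.1, t.2.2))).filter (fun r => r.1 == ps)).map (fun r => r.2)) (fun x => x) 0))) events,
      pvItemsFoldlInsertFun (fun ev =>
        PySem.List.maxD (0 :: (T.filter (fun t => t.1 == ev)).map (fun t => t.2.1)) (fun x => x) 0) events]
  simp only [List.map_map]
  refine Prod.ext ?_ ?_
  · -- event_point_map component
    refine List.map_congr_left ?_
    intro e _
    simp only [Function.comp_apply]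
    congr 1
    -- A's inner dict for event e, as items
    have hfm : ((T.filter (fun x => x.1 == e)).map (fun x => x.2)).foldl pvStepPM PySem.Dict.empty
        = ((T.filter (fun t => t.1 == e)).map (fun t => (get_place_string t.2.1, t.2.2))).foldl
            pvStepPS PySem.Dict.empty := by
      rw [List.foldl_map, List.foldl_map]
      rfl
    rw [hfm, pvInner _ PySem.Dict.empty (by rw [PySem.Dict.keys_empty]; exact List.nodup_nil)]
    rw [pvOrder_eq _ []]
    simp [PySem.Dict.keys_empty]
    rfl
  · -- event_field_size component
    refine List.map_congr_left ?_
    intro e _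
    simp only [Function.comp_apply]
    congr 1
    rw [pvFS_eq_max, pvMaxD_zero_cons, List.map_map]
    rfl
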